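-- pv_equiv track=rewrite | github.com/Muhammadatir/FitnessNavigator | pdf_generator.py | generate_grocery_list
-- ===== SOURCE A (Python) =====
-- def generate_grocery_list(diet_plan, user_data):
--     """Generate grocery list from diet plan"""
--     grocery_items = {
--         'Proteins': {},
--         'Vegetables': {},
--         'Fruits': {},
--         'Grains': {},
--         'Dairy': {},
--         'Others': {}
--     }
--
--     # Extract ingredients from diet plan
--     for day, meals in diet_plan.items():
--         for meal_type, meal_info in meals.items():
--             if isinstance(meal_info, dict) and 'meal' in meal_info:
--                 meal_text = meal_info['meal'].lower()
--             else:
--                 meal_text = str(meal_info).lower()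
--
--             # Categorize ingredients
--             if any(word in meal_text for word in ['chicken', 'fish', 'egg', 'tofu', 'beef', 'turkey', 'salmon']):
--                 if 'chicken' in meal_text: grocery_items['Proteins']['Chicken breast'] = '1 kg'
--                 if 'fish' in meal_text or 'salmon' in meal_text: grocery_items['Proteins']['Fish fillets'] = '800g'
--                 if 'egg' in meal_text: grocery_items['Proteins']['Eggs'] = '12 pieces'
--                 if 'tofu' in meal_text: grocery_items['Proteins']['Tofu'] = '400g'
--                 if 'beef' in meal_text: grocery_items['Proteins']['Lean beef'] = '600g'
--                 if 'turkey' in meal_text: grocery_items['Proteins']['Turkey'] = '500g'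
--
--             if any(word in meal_text for word in ['spinach', 'broccoli', 'carrot', 'bell pepper', 'tomato', 'cucumber']):
--                 grocery_items['Vegetables']['Mixed vegetables'] = '2 kg'
--                 grocery_items['Vegetables']['Leafy greens'] = '500g'
--                 grocery_items['Vegetables']['Tomatoes'] = '1 kg'
--                 grocery_items['Vegetables']['Onions'] = '500g'
--
--             if any(word in meal_text for word in ['apple', 'banana', 'berries', 'orange', 'fruit']):
--                 grocery_items['Fruits']['Bananas'] = '1 dozen'
--                 grocery_items['Fruits']['Apples'] = '1 kg'
--                 grocery_items['Fruits']['Mixed berries'] = '500g'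
--                 grocery_items['Fruits']['Oranges'] = '6 pieces'
--
--             if any(word in meal_text for word in ['rice', 'oats', 'bread', 'quinoa', 'pasta']):
--                 grocery_items['Grains']['Brown rice'] = '1 kg'
--                 grocery_items['Grains']['Oats'] = '500g'
--                 grocery_items['Grains']['Whole grain bread'] = '2 loaves'
--                 if 'quinoa' in meal_text: grocery_items['Grains']['Quinoa'] = '500g'
--                 if 'pasta' in meal_text: grocery_items['Grains']['Whole grain pasta'] = '500g'
--
--             if any(word in meal_text for word in ['milk', 'yogurt', 'cheese']):
--                 grocery_items['Dairy']['Greek yogurt'] = '1 kg'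
--                 grocery_items['Dairy']['Milk'] = '2 liters'
--                 if 'cheese' in meal_text: grocery_items['Dairy']['Cheese'] = '200g'
--
--             if any(word in meal_text for word in ['nuts', 'oil', 'honey', 'spices']):
--                 grocery_items['Others']['Mixed nuts'] = '300g'
--                 grocery_items['Others']['Olive oil'] = '500ml'
--                 grocery_items['Others']['Honey'] = '250g'
--                 grocery_items['Others']['Spices & herbs'] = 'As needed'
--
--     return grocery_items
-- ===== SOURCE B (Python) =====
-- # Pipeline rewrite: instead of mutating nested dicts meal by meal, map each meal to its matched
-- # grocery entries, flatten across all meals, dedup by first occurrence, then group by category.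
-- VEG = ('spinach', 'broccoli', 'carrot', 'bell pepper', 'tomato', 'cucumber')
-- FRUIT = ('apple', 'banana', 'berries', 'orange', 'fruit')
-- GRAIN = ('rice', 'oats', 'bread', 'quinoa', 'pasta')
-- DAIRY = ('milk', 'yogurt', 'cheese')
-- OTHER = ('nuts', 'oil', 'honey', 'spices')
--
-- ENTRIES = [
--     ('Proteins', 'Chicken breast', '1 kg', ('chicken',)),
--     ('Proteins', 'Fish fillets', '800g', ('fish', 'salmon')),
--     ('Proteins', 'Eggs', '12 pieces', ('egg',)),
--     ('Proteins', 'Tofu', '400g', ('tofu',)),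
--     ('Proteins', 'Lean beef', '600g', ('beef',)),
--     ('Proteins', 'Turkey', '500g', ('turkey',)),
--     ('Vegetables', 'Mixed vegetables', '2 kg', VEG),
--     ('Vegetables', 'Leafy greens', '500g', VEG),
--     ('Vegetables', 'Tomatoes', '1 kg', VEG),
--     ('Vegetables', 'Onions', '500g', VEG),
--     ('Fruits', 'Bananas', '1 dozen', FRUIT),
--     ('Fruits', 'Apples', '1 kg', FRUIT),
--     ('Fruits', 'Mixed berries', '500g', FRUIT),
--     ('Fruits', 'Oranges', '6 pieces', FRUIT),
--     ('Grains', 'Brown rice', '1 kg', GRAIN),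
--     ('Grains', 'Oats', '500g', GRAIN),
--     ('Grains', 'Whole grain bread', '2 loaves', GRAIN),
--     ('Grains', 'Quinoa', '500g', ('quinoa',)),
--     ('Grains', 'Whole grain pasta', '500g', ('pasta',)),
--     ('Dairy', 'Greek yogurt', '1 kg', DAIRY),
--     ('Dairy', 'Milk', '2 liters', DAIRY),
--     ('Dairy', 'Cheese', '200g', ('cheese',)),
--     ('Others', 'Mixed nuts', '300g', OTHER),
--     ('Others', 'Olive oil', '500ml', OTHER),
--     ('Others', 'Honey', '250g', OTHER),
--     ('Others', 'Spices & herbs', 'As needed', OTHER),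
-- ]
--
-- CATEGORIES = ['Proteins', 'Vegetables', 'Fruits', 'Grains', 'Dairy', 'Others']
--
--
-- def generate_grocery_list(diet_plan, user_data):
--     """Generate grocery list from diet plan"""
--     texts = [(mi['meal'] if isinstance(mi, dict) and 'meal' in mi else str(mi)).lower()
--              for meals in diet_plan.values() for mi in meals.values()]
--     # every matched entry, meal by meal, in table order
--     occurrences = [e for t in texts for e in ENTRIES if any(w in t for w in e[3])]
--     # keep the first occurrence of each entry
--     order = list(dict.fromkeys(occurrences))
--     return {c: {item: qty for cat, item, qty, _ in order if cat == c}
--             for c in CATEGORIES}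
-- ===== Notes on version B (the rewrite author's own statement) =====
-- stated objective: alternative
-- what changed: Replaces A's in-place mutation of six nested dicts inside the meal loop by a pure staged pipeline: map each meal to its matched grocery entries from one table, flatten across meals, dedup keeping first occurrences (dict.fromkeys), then group the surviving entries by category.
import Mathlib
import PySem

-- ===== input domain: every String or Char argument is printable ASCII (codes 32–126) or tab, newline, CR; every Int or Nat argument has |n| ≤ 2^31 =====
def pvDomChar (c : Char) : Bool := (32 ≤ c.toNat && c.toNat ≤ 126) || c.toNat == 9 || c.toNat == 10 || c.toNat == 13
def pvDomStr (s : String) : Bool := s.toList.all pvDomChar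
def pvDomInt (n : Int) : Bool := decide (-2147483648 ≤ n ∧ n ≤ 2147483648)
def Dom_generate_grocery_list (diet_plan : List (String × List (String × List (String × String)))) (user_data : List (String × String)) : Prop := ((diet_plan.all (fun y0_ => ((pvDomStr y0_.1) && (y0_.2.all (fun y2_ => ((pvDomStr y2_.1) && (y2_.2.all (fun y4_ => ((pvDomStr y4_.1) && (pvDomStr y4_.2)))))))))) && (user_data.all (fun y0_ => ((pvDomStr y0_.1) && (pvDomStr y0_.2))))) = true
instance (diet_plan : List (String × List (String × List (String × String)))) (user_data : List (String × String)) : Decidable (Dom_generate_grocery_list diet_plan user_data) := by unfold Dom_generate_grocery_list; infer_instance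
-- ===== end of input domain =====

-- ===== PORT A =====
-- B replaces A's in-place mutation of six nested dicts inside the meal loop by a staged pipeline
-- (match entries per meal, flatten, first-occurrence dedup, group by category); return value only.
-- Shared text extraction (both Pythons contain these exact lines):
-- repr(s) for a printable-ASCII (plus tab/LF/CR) string — hand port, exact on that domain.
def pyReprChars (cs : List Char) : List Char :=
  let q : Char := if cs.contains '\'' && !cs.contains '"' then '"' else '\''
  q :: (cs.flatMap (fun c =>
    if c = '\\' then ['\\', '\\']
    else if c = q then ['\\', q]
    else if c = '\t' then ['\\', 't']
    else if c = '\n' then ['\\', 'n']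
    else if c = '\r' then ['\\', 'r']
    else [c])) ++ [q]

-- str(d) for a dict of strings — hand port of CPython's dict repr, exact on the ASCII domain.
def pyStrOfDict (items : List (String × String)) : List Char :=
  '{' :: PySem.Chars.join (", ".toList)
    (items.map (fun p => pyReprChars p.1.toList ++ ':' :: ' ' :: pyReprChars p.2.toList)) ++ ['}']

-- meal_text = meal_info['meal'].lower() if 'meal' in meal_info else str(meal_info).lower()
def mealText (meal_info : List (String × String)) : List Char :=
  let d := PySem.Dict.ofList meal_info
  match d.get? "meal" with
  | some s => PySem.Chars.lower s.toList
  | none => PySem.Chars.lower (pyStrOfDict d.items)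

def gInit : PySem.Dict String (PySem.Dict String String) :=
  PySem.Dict.ofList [("Proteins", PySem.Dict.empty), ("Vegetables", PySem.Dict.empty),
    ("Fruits", PySem.Dict.empty), ("Grains", PySem.Dict.empty),
    ("Dairy", PySem.Dict.empty), ("Others", PySem.Dict.empty)]

-- grocery_items[cat][item] = qty
def gIns (g : PySem.Dict String (PySem.Dict String String)) (cat item qty : String) :
    PySem.Dict String (PySem.Dict String String) :=
  g.modify cat PySem.Dict.empty (fun m => m.insert item qty)

def hasWord (text : List Char) (w : String) : Bool := PySem.Chars.isIn w.toList text

-- A's six categorization blocks, in source order.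
def proA (g : PySem.Dict String (PySem.Dict String String)) (text : List Char) :
    PySem.Dict String (PySem.Dict String String) :=
  if ["chicken", "fish", "egg", "tofu", "beef", "turkey", "salmon"].any (hasWord text) then
    let g := if hasWord text "chicken" then gIns g "Proteins" "Chicken breast" "1 kg" else g
    let g := if hasWord text "fish" || hasWord text "salmon" then gIns g "Proteins" "Fish fillets" "800g" else g
    let g := if hasWord text "egg" then gIns g "Proteins" "Eggs" "12 pieces" else g
    let g := if hasWord text "tofu" then gIns g "Proteins" "Tofu" "400g" else g
    let g := if hasWord text "beef" then gIns g "Proteins" "Lean beef" "600g" else g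
    if hasWord text "turkey" then gIns g "Proteins" "Turkey" "500g" else g
  else g

def vegA (g : PySem.Dict String (PySem.Dict String String)) (text : List Char) :
    PySem.Dict String (PySem.Dict String String) :=
  if ["spinach", "broccoli", "carrot", "bell pepper", "tomato", "cucumber"].any (hasWord text) then
    gIns (gIns (gIns (gIns g "Vegetables" "Mixed vegetables" "2 kg")
      "Vegetables" "Leafy greens" "500g") "Vegetables" "Tomatoes" "1 kg") "Vegetables" "Onions" "500g"
  else g

def fruA (g : PySem.Dict String (PySem.Dict String String)) (text : List Char) :
    PySem.Dict String (PySem.Dict String String) :=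
  if ["apple", "banana", "berries", "orange", "fruit"].any (hasWord text) then
    gIns (gIns (gIns (gIns g "Fruits" "Bananas" "1 dozen")
      "Fruits" "Apples" "1 kg") "Fruits" "Mixed berries" "500g") "Fruits" "Oranges" "6 pieces"
  else g

def graA (g : PySem.Dict String (PySem.Dict String String)) (text : List Char) :
    PySem.Dict String (PySem.Dict String String) :=
  if ["rice", "oats", "bread", "quinoa", "pasta"].any (hasWord text) then
    let g := gIns (gIns (gIns g "Grains" "Brown rice" "1 kg")
      "Grains" "Oats" "500g") "Grains" "Whole grain bread" "2 loaves"
    let g := if hasWord text "quinoa" then gIns g "Grains" "Quinoa" "500g" else g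
    if hasWord text "pasta" then gIns g "Grains" "Whole grain pasta" "500g" else g
  else g

def daiA (g : PySem.Dict String (PySem.Dict String String)) (text : List Char) :
    PySem.Dict String (PySem.Dict String String) :=
  if ["milk", "yogurt", "cheese"].any (hasWord text) then
    let g := gIns (gIns g "Dairy" "Greek yogurt" "1 kg") "Dairy" "Milk" "2 liters"
    if hasWord text "cheese" then gIns g "Dairy" "Cheese" "200g" else g
  else g

def othA (g : PySem.Dict String (PySem.Dict String String)) (text : List Char) :
    PySem.Dict String (PySem.Dict String String) :=
  if ["nuts", "oil", "honey", "spices"].any (hasWord text) then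
    gIns (gIns (gIns (gIns g "Others" "Mixed nuts" "300g")
      "Others" "Olive oil" "500ml") "Others" "Honey" "250g") "Others" "Spices & herbs" "As needed"
  else g

def stepA (g : PySem.Dict String (PySem.Dict String String)) (text : List Char) :
    PySem.Dict String (PySem.Dict String String) :=
  othA (daiA (graA (fruA (vegA (proA g text) text) text) text) text) text

def generate_grocery_list (diet_plan : List (String × List (String × List (String × String)))) (user_data : List (String × String)) : List (String × List (String × String)) :=
  let g := (PySem.Dict.ofList diet_plan).items.foldl (fun g day =>
    (PySem.Dict.ofList day.2).items.foldl (fun g m => stepA g (mealText m.2)) g) gInit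
  g.items.map (fun p => (p.1, p.2.items))

-- ===== PORT B =====
-- B's entry table: (category, item, quantity, trigger words), one row per grocery entry.
def pvVeg : List String := ["spinach", "broccoli", "carrot", "bell pepper", "tomato", "cucumber"]
def pvFruit : List String := ["apple", "banana", "berries", "orange", "fruit"]
def pvGrain : List String := ["rice", "oats", "bread", "quinoa", "pasta"]
def pvDairy : List String := ["milk", "yogurt", "cheese"]
def pvOther : List String := ["nuts", "oil", "honey", "spices"]

def pvEntries : List (String × String × String × List String) :=
  [("Proteins", "Chicken breast", "1 kg", ["chicken"]),
   ("Proteins", "Fish fillets", "800g", ["fish", "salmon"]),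
   ("Proteins", "Eggs", "12 pieces", ["egg"]),
   ("Proteins", "Tofu", "400g", ["tofu"]),
   ("Proteins", "Lean beef", "600g", ["beef"]),
   ("Proteins", "Turkey", "500g", ["turkey"]),
   ("Vegetables", "Mixed vegetables", "2 kg", pvVeg),
   ("Vegetables", "Leafy greens", "500g", pvVeg),
   ("Vegetables", "Tomatoes", "1 kg", pvVeg),
   ("Vegetables", "Onions", "500g", pvVeg),
   ("Fruits", "Bananas", "1 dozen", pvFruit),
   ("Fruits", "Apples", "1 kg", pvFruit),
   ("Fruits", "Mixed berries", "500g", pvFruit),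
   ("Fruits", "Oranges", "6 pieces", pvFruit),
   ("Grains", "Brown rice", "1 kg", pvGrain),
   ("Grains", "Oats", "500g", pvGrain),
   ("Grains", "Whole grain bread", "2 loaves", pvGrain),
   ("Grains", "Quinoa", "500g", ["quinoa"]),
   ("Grains", "Whole grain pasta", "500g", ["pasta"]),
   ("Dairy", "Greek yogurt", "1 kg", pvDairy),
   ("Dairy", "Milk", "2 liters", pvDairy),
   ("Dairy", "Cheese", "200g", ["cheese"]),
   ("Others", "Mixed nuts", "300g", pvOther),
   ("Others", "Olive oil", "500ml", pvOther),
   ("Others", "Honey", "250g", pvOther),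
   ("Others", "Spices & herbs", "As needed", pvOther)]

def pvCats : List String := ["Proteins", "Vegetables", "Fruits", "Grains", "Dairy", "Others"]

def generate_grocery_list_alt (diet_plan : List (String × List (String × List (String × String)))) (user_data : List (String × String)) : List (String × List (String × String)) :=
  let texts := (PySem.Dict.ofList diet_plan).values.flatMap
    (fun meals => (PySem.Dict.ofList meals).values.map mealText)
  -- every matched entry, meal by meal, in table order
  let occurrences := texts.flatMap (fun t => pvEntries.filter (fun e => e.2.2.2.any (hasWord t)))
  -- keep the first occurrence of each entry (dict.fromkeys)
  let order := PySem.List.dedup occurrences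
  pvCats.map (fun c => (c, order.filterMap (fun e => if e.1 = c then some (e.2.1, e.2.2.1) else none)))

-- ===== PRECONDITION & SPEC =====
def Spec_generate_grocery_list (diet_plan : List (String × List (String × List (String × String)))) (user_data : List (String × String)) (out : List (String × List (String × String))) : Prop := out = generate_grocery_list_alt diet_plan user_data
instance (diet_plan : List (String × List (String × List (String × String)))) (user_data : List (String × String)) (out : List (String × List (String × String))) : Decidable (Spec_generate_grocery_list diet_plan user_data out) := by unfold Spec_generate_grocery_list; infer_instance

-- ===== CLAIM (what is proved, stated in full; the proofs are below) =====
def Claim_equal_generate_grocery_list : Prop := ∀ (diet_plan : List (String × List (String × List (String × String)))) (user_data : List (String × String)), Dom_generate_grocery_list diet_plan user_data → Spec_generate_grocery_list diet_plan user_data (generate_grocery_list diet_plan user_data)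

-- ===== LEMMAS AND PROOFS =====
def insE (g : PySem.Dict String (PySem.Dict String String)) (e : String × String × String × List String) :
    PySem.Dict String (PySem.Dict String String) := gIns g e.1 e.2.1 e.2.2.1

def entP : List (String × String × String × List String) := pvEntries.take 6
def entV : List (String × String × String × List String) := (pvEntries.drop 6).take 4
def entF : List (String × String × String × List String) := (pvEntries.drop 10).take 4
def entG : List (String × String × String × List String) := (pvEntries.drop 14).take 5
def entD : List (String × String × String × List String) := (pvEntries.drop 19).take 3
def entO : List (String × String × String × List String) := pvEntries.drop 22

theorem pvEntries_split : pvEntries = entP ++ entV ++ entF ++ entG ++ entD ++ entO := by decide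

theorem foldP_eq (g : PySem.Dict String (PySem.Dict String String)) (t : List Char) :
    (entP.filter (fun e => e.2.2.2.any (hasWord t))).foldl insE g = proA g t := by
  rw [List.foldl_filter, proA]
  by_cases h : (["chicken", "fish", "egg", "tofu", "beef", "turkey", "salmon"].any (hasWord t)) = true
  · simp only [h, if_true, entP, pvEntries, List.take, List.foldl_cons, List.foldl_nil, insE,
      List.any_cons, List.any_nil, Bool.or_false]
  · simp only [List.any_cons, List.any_nil, Bool.or_false, Bool.or_eq_false_iff,
      Bool.not_eq_true] at h
    obtain ⟨hc, hf, he, ht', hb, htk, hs⟩ := h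
    simp [entP, pvEntries, List.any_cons, hc, hf, he, ht', hb, htk, hs]

theorem foldV_eq (g : PySem.Dict String (PySem.Dict String String)) (t : List Char) :
    (entV.filter (fun e => e.2.2.2.any (hasWord t))).foldl insE g = vegA g t := by
  rw [List.foldl_filter, vegA]
  by_cases h : (["spinach", "broccoli", "carrot", "bell pepper", "tomato", "cucumber"].any (hasWord t)) = true
  · simp only [entV, pvEntries, pvVeg, List.take, List.drop, List.foldl_cons, List.foldl_nil, insE, h, if_true]
  · simp [entV, pvEntries, pvVeg, List.any_eq_true] at h ⊢
    simp [h]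

theorem foldF_eq (g : PySem.Dict String (PySem.Dict String String)) (t : List Char) :
    (entF.filter (fun e => e.2.2.2.any (hasWord t))).foldl insE g = fruA g t := by
  rw [List.foldl_filter, fruA]
  by_cases h : (["apple", "banana", "berries", "orange", "fruit"].any (hasWord t)) = true
  · simp only [entF, pvEntries, pvFruit, List.take, List.drop, List.foldl_cons, List.foldl_nil, insE, h, if_true]
  · simp [entF, pvEntries, pvFruit, List.any_eq_true] at h ⊢
    simp [h]

theorem foldG_eq (g : PySem.Dict String (PySem.Dict String String)) (t : List Char) :
    (entG.filter (fun e => e.2.2.2.any (hasWord t))).foldl insE g = graA g t := by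
  rw [List.foldl_filter, graA]
  by_cases h : (["rice", "oats", "bread", "quinoa", "pasta"].any (hasWord t)) = true
  · simp only [entG, pvEntries, pvGrain, List.take, List.drop, List.foldl_cons, List.foldl_nil, insE, h,
      if_true, List.any_cons, List.any_nil, Bool.or_false]
  · simp only [List.any_cons, List.any_nil, Bool.or_false, Bool.or_eq_false_iff,
      Bool.not_eq_true] at h
    obtain ⟨hr, ho, hb, hq, hp⟩ := h
    simp [entG, pvEntries, pvGrain, List.any_cons, hr, ho, hb, hq, hp]

theorem foldD_eq (g : PySem.Dict String (PySem.Dict String String)) (t : List Char) :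
    (entD.filter (fun e => e.2.2.2.any (hasWord t))).foldl insE g = daiA g t := by
  rw [List.foldl_filter, daiA]
  by_cases h : (["milk", "yogurt", "cheese"].any (hasWord t)) = true
  · simp only [entD, pvEntries, pvDairy, List.take, List.drop, List.foldl_cons, List.foldl_nil, insE, h,
      if_true, List.any_cons, List.any_nil, Bool.or_false]
  · simp only [List.any_cons, List.any_nil, Bool.or_false, Bool.or_eq_false_iff,
      Bool.not_eq_true] at h
    obtain ⟨hm, hy, hc⟩ := h
    simp [entD, pvEntries, pvDairy, List.any_cons, hm, hy, hc]

theorem foldO_eq (g : PySem.Dict String (PySem.Dict String String)) (t : List Char) :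
    (entO.filter (fun e => e.2.2.2.any (hasWord t))).foldl insE g = othA g t := by
  rw [List.foldl_filter, othA]
  by_cases h : (["nuts", "oil", "honey", "spices"].any (hasWord t)) = true
  · simp only [entO, pvEntries, pvOther, List.drop, List.foldl_cons, List.foldl_nil, insE, h, if_true]
  · simp [entO, pvEntries, pvOther, List.any_eq_true] at h ⊢
    simp [h]

def matchE (t : List Char) : List (String × String × String × List String) :=
  pvEntries.filter (fun e => e.2.2.2.any (hasWord t))

theorem stepA_eq_fold (g : PySem.Dict String (PySem.Dict String String)) (t : List Char) :
    stepA g t = (matchE t).foldl insE g := by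
  rw [matchE, pvEntries_split]
  simp only [List.filter_append, List.foldl_append]
  rw [foldP_eq, foldV_eq, foldF_eq, foldG_eq, foldD_eq, foldO_eq, stepA]

def selC (c : String) (e : String × String × String × List String) : Option (String × String) :=
  if e.1 = c then some (e.2.1, e.2.2.1) else none

def buildG (d : List (String × String × String × List String)) :
    PySem.Dict String (PySem.Dict String String) :=
  PySem.Dict.mk (pvCats.map (fun c => (c, PySem.Dict.mk (d.filterMap (selC c)))))

theorem pv_uniq : ∀ x ∈ pvEntries, ∀ y ∈ pvEntries, x.2.1 = y.2.1 → x = y := by decide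
theorem pv_cat_mem : ∀ x ∈ pvEntries, x.1 ∈ pvCats := by decide

theorem inner_ins (d : List (String × String × String × List String))
    (hd : ∀ x ∈ d, x ∈ pvEntries) (e : String × String × String × List String)
    (he : e ∈ pvEntries) :
    (PySem.Dict.mk (d.filterMap (selC e.1))).insert e.2.1 e.2.2.1
      = PySem.Dict.mk ((PySem.Set.add d e).filterMap (selC e.1)) := by
  have hsel : selC e.1 e = some (e.2.1, e.2.2.1) := by simp [selC]
  by_cases hmem : e ∈ d
  · rw [PySem.Set.add_of_mem hmem]
    have hpair : (e.2.1, e.2.2.1) ∈ d.filterMap (selC e.1) := List.mem_filterMap.2 ⟨e, hmem, hsel⟩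
    have hcon : (PySem.Dict.mk (d.filterMap (selC e.1))).contains e.2.1 = true := by
      simp only [PySem.Dict.contains, List.any_eq_true]
      exact ⟨_, hpair, by simp⟩
    rw [PySem.Dict.insert]
    simp only [hcon, if_true]
    congr 1
    have : ∀ p ∈ d.filterMap (selC e.1),
        (if (p.1 == e.2.1) = true then (e.2.1, e.2.2.1) else p) = p := by
      intro p hp
      obtain ⟨x, hx, hsx⟩ := List.mem_filterMap.1 hp
      simp only [selC] at hsx
      split at hsx
      · obtain rfl : (x.2.1, x.2.2.1) = p := by simpa using hsx
        by_cases hk : x.2.1 = e.2.1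
        · have : x = e := pv_uniq x (hd x hx) e he hk
          subst this; simp
        · simp [hk]
      · exact absurd hsx (by simp)
    calc List.map (fun p => if (p.1 == e.2.1) = true then (e.2.1, e.2.2.1) else p)
          (d.filterMap (selC e.1))
        = List.map id (d.filterMap (selC e.1)) := List.map_congr_left (by simpa using this)
      _ = _ := List.map_id _
  · rw [PySem.Set.add_of_not_mem hmem]
    have hcon : (PySem.Dict.mk (d.filterMap (selC e.1))).contains e.2.1 = false := by
      simp only [PySem.Dict.contains, List.any_eq_false]
      intro p hp
      obtain ⟨x, hx, hsx⟩ := List.mem_filterMap.1 hp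
      simp only [selC] at hsx
      split at hsx
      · obtain rfl : (x.2.1, x.2.2.1) = p := by simpa using hsx
        simp only [beq_iff_eq]
        intro hk
        exact hmem (pv_uniq x (hd x hx) e he hk ▸ hx)
      · exact absurd hsx (by simp)
    rw [PySem.Dict.insert]
    simp only [hcon, Bool.false_eq_true, if_false]
    congr 1
    rw [List.filterMap_append]
    simp [hsel]

theorem other_cat (d : List (String × String × String × List String))
    (e : String × String × String × List String) (c : String) (hc : e.1 ≠ c) :
    (PySem.Set.add d e).filterMap (selC c) = d.filterMap (selC c) := by
  rw [PySem.Set.add_eq_ite]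
  split
  · rfl
  · rw [List.filterMap_append]
    simp [selC, hc]

theorem insE_buildG (d : List (String × String × String × List String))
    (e : String × String × String × List String) (he : e ∈ pvEntries)
    (hd : ∀ x ∈ d, x ∈ pvEntries) :
    insE (buildG d) e = buildG (PySem.Set.add d e) := by
  obtain ⟨c, i, q, ws⟩ := e
  have hc : c ∈ pvCats := pv_cat_mem _ he
  have hin := inner_ins d hd (c, i, q, ws) he
  have hoth := other_cat d (c, i, q, ws)
  simp only at hin hoth
  fin_cases hc <;>
  · simp only [insE, gIns, PySem.Dict.modify, buildG, pvCats, List.map_cons, List.map_nil]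
    simp [PySem.Dict.getD, PySem.Dict.get?, PySem.Dict.insert, PySem.Dict.contains, List.find?,
      hoth]
    simpa [PySem.Dict.insert, PySem.Dict.contains] using hin

theorem foldl_insE_eq_buildG (occ : List (String × String × String × List String))
    (hocc : ∀ e ∈ occ, e ∈ pvEntries) :
    occ.foldl insE gInit = buildG (PySem.List.dedup occ) := by
  induction occ using List.reverseRecOn with
  | nil => decide
  | append_singleton xs x ih =>
    have hx : x ∈ pvEntries := hocc x (by simp)
    have hxs : ∀ e ∈ xs, e ∈ pvEntries := fun e he => hocc e (by simp [he])
    rw [List.foldl_append, List.foldl_cons, List.foldl_nil, ih hxs]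
    have hdmem : ∀ y ∈ PySem.List.dedup xs, y ∈ pvEntries := by
      intro y hy
      exact hxs y (by simpa [PySem.List.dedup, PySem.Set.mem_ofList] using hy)
    rw [insE_buildG _ _ hx hdmem]
    simp [PySem.List.dedup, PySem.Set.ofList_append_singleton]

theorem final_eq (diet_plan : List (String × List (String × List (String × String)))) (user_data : List (String × String)) :
    generate_grocery_list diet_plan user_data = generate_grocery_list_alt diet_plan user_data := by
  unfold generate_grocery_list generate_grocery_list_alt
  have hA : (PySem.Dict.ofList diet_plan).items.foldl (fun g day =>
        (PySem.Dict.ofList day.2).items.foldl (fun g m => stepA g (mealText m.2)) g) gInit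
      = (((PySem.Dict.ofList diet_plan).values.flatMap
          (fun meals => (PySem.Dict.ofList meals).values.map mealText)).flatMap matchE).foldl insE gInit := by
    simp only [List.foldl_flatMap, ← stepA_eq_fold, PySem.Dict.values, List.foldl_map]
  have hmem : ∀ e ∈ ((PySem.Dict.ofList diet_plan).values.flatMap
      (fun meals => (PySem.Dict.ofList meals).values.map mealText)).flatMap matchE, e ∈ pvEntries := by
    intro e he
    obtain ⟨t, _, ht⟩ := List.mem_flatMap.1 he
    exact (List.mem_filter.1 ht).1
  simp only [hA, foldl_insE_eq_buildG _ hmem, buildG, List.map_map]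
  rfl

-- ===== VERDICT (by name: the statement is the Claim_ definition above) =====
theorem generate_grocery_list_spec : Claim_equal_generate_grocery_list := by
  intro diet_plan user_data _
  unfold Spec_generate_grocery_list
  exact final_eq diet_plan user_data
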